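-- pv_equiv track=rewrite | github.com/jyotiyadav94/GoogleCloudPlatform | handler_torchserve/deploy-hugging-face-model-to-gcp-main/handlers/handler.py | process_form
-- ===== SOURCE A (Python) =====
-- from itertools import groupby
--
-- def process_form(json_df):
--
--   labels = [x['LABEL'] for x in json_df]
--   texts = [x['TEXT'] for x in json_df]
--   cmb_list = []
--   for i, j in enumerate(labels):
--     cmb_list.append([labels[i], texts[i]])
--
--   grouper = lambda l: [[k] + sum((v[1::] for v in vs), []) for k, vs in groupby(l, lambda x: x[0])]
--
--   list_final = grouper(cmb_list)
--   lst_final = []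
--   for x in list_final:
--     json_dict = {}
--     json_dict[x[0]] = (' ').join(x[1:])
--     lst_final.append(json_dict)
--
--   return lst_final
-- ===== SOURCE B (Python) =====
-- def process_form(json_df):
--     result = []
--     cur_label = None
--     acc = []
--     for row in json_df:
--         label = row['LABEL']
--         text = row['TEXT']
--         if acc and label == cur_label:
--             acc.append(text)
--         else:
--             if acc:
--                 result.append({cur_label: ' '.join(acc)})
--             cur_label = label
--             acc = [text]
--     if acc:
--         result.append({cur_label: ' '.join(acc)})
--     return result
-- ===== Notes on version B (the rewrite author's own statement) =====
-- stated objective: simpler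
-- what changed: A's three stages (build [label,text] pair lists, itertools.groupby with sum() of tails, then a reshaping loop into single-key dicts) are collapsed into one loop that keeps a running label and text accumulator and emits each run's dict directly.
import Mathlib
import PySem

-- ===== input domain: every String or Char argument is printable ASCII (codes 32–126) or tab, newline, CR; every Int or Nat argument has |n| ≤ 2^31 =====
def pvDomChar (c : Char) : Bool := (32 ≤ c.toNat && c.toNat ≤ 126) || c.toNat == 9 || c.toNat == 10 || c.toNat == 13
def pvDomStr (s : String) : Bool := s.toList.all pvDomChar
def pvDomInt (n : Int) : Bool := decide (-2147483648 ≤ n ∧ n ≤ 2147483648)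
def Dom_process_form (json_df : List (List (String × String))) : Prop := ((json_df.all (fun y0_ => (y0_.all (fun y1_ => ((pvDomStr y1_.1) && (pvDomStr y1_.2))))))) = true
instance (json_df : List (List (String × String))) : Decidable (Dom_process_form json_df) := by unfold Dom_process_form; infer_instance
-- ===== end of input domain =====

-- B replaces A's two-stage pipeline (build [label,text] pair lists, itertools.groupby + sum of
-- tails, then a reshaping loop into dicts) by one pass holding a running label and a text
-- accumulator: simpler decomposition, same return value.

-- shared field access: row['LABEL'] / row['TEXT'] (first-match lookup on the association list)
def pvLabel (row : List (String × String)) : String := ((PySem.Dict.mk row).get? "LABEL").getD ""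
def pvText (row : List (String × String)) : String := ((PySem.Dict.mk row).get? "TEXT").getD ""

-- ===== PORT A =====
-- itertools.groupby(l, key = lambda x: x[0]): consecutive runs as (key, members)
def pyGroupByHead (l : List (List String)) : List (String × List (List String)) :=
  match l with
  | [] => []
  | x :: xs =>
    let k := (PySem.List.pyGet? x 0).getD ""
    let run := xs.takeWhile (fun v => ((PySem.List.pyGet? v 0).getD "") == k)
    let rest := xs.dropWhile (fun v => ((PySem.List.pyGet? v 0).getD "") == k)
    (k, x :: run) :: pyGroupByHead rest
termination_by l.length
decreasing_by
  have := List.length_dropWhile_le (fun v => ((PySem.List.pyGet? v 0).getD "") == k) xs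
  simp; omega

def process_form (json_df : List (List (String × String))) : List (List (String × String)) :=
  let labels := json_df.map (fun x => pvLabel x)
  let texts := json_df.map (fun x => pvText x)
  -- the enumerate loop appends [labels[i], texts[i]] for each i: the elementwise zip of the lists
  let cmb_list := (List.zip labels texts).map (fun p => [p.1, p.2])
  -- grouper: [[k] + sum((v[1::] for v in vs), []) for k, vs in groupby(l, lambda x: x[0])]
  let list_final := (pyGroupByHead cmb_list).map
    (fun g => [g.1] ++ (g.2.map (fun v => PySem.List.slice v (some 1) none)).flatten)
  -- the reshaping loop: {x[0]: ' '.join(x[1:])} for each x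
  list_final.map (fun x =>
    [((PySem.List.pyGet? x 0).getD "", PySem.Str.join " " (PySem.List.slice x (some 1) none))])

-- ===== PORT B =====
-- loop state: (result so far, current label, accumulated texts); acc = [] encodes "no open run"
def pvBStep (st : List (List (String × String)) × String × List String)
    (row : List (String × String)) : List (List (String × String)) × String × List String :=
  let label := pvLabel row
  let text := pvText row
  if !st.2.2.isEmpty && label == st.2.1 then
    (st.1, st.2.1, st.2.2 ++ [text])
  else
    ((if st.2.2.isEmpty then st.1 else st.1 ++ [[(st.2.1, PySem.Str.join " " st.2.2)]]),
      label, [text])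

def process_form_alt (json_df : List (List (String × String))) : List (List (String × String)) :=
  let st := json_df.foldl pvBStep ([], "", [])
  if st.2.2.isEmpty then st.1 else st.1 ++ [[(st.2.1, PySem.Str.join " " st.2.2)]]

-- ===== PRECONDITION & SPEC =====
-- Pre_ excludes exactly the rows missing a 'LABEL' or 'TEXT' key, on which Python A raises KeyError.
def Pre_process_form (json_df : List (List (String × String))) : Prop :=
  ∀ row ∈ json_df, ((PySem.Dict.mk row).get? "LABEL").isSome ∧ ((PySem.Dict.mk row).get? "TEXT").isSome
instance (json_df : List (List (String × String))) : Decidable (Pre_process_form json_df) := by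
  unfold Pre_process_form; infer_instance

def pvWitness_process_form : (List (List (String × String))) :=
  [[("LABEL", "a"), ("TEXT", "hello")], [("LABEL", "a"), ("TEXT", "world")], [("LABEL", "b"), ("TEXT", "!")]]

def Spec_process_form (json_df : List (List (String × String))) (out : List (List (String × String))) : Prop := out = process_form_alt json_df
instance (json_df : List (List (String × String))) (out : List (List (String × String))) : Decidable (Spec_process_form json_df out) := by unfold Spec_process_form; infer_instance

-- ===== CLAIM (what is proved, stated in full; the proofs are below) =====
def Claim_equal_process_form : Prop := ∀ (json_df : List (List (String × String))), Dom_process_form json_df → Pre_process_form json_df → Spec_process_form json_df (process_form json_df)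

-- ===== LEMMAS AND PROOFS =====

-- reference form of the result: one dict per consecutive run of equal labels, by run splitting;
-- both ports are reduced to it
def pvRef (rows : List (List (String × String))) : List (List (String × String)) :=
  match rows with
  | [] => []
  | r :: rs =>
    [(pvLabel r, PySem.Str.join " "
        (pvText r :: (rs.takeWhile (fun y => pvLabel y == pvLabel r)).map pvText))]
      :: pvRef (rs.dropWhile (fun y => pvLabel y == pvLabel r))
termination_by rows.length
decreasing_by
  have := List.length_dropWhile_le (fun y => pvLabel y == pvLabel r) rs
  simp; omega

def pvToRow (r : List (String × String)) : List String := [pvLabel r, pvText r]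

theorem comb : ∀ (n : Nat) (l : List (List (String × String))), l.length ≤ n →
    ((pyGroupByHead (l.map pvToRow)).map
      (fun g => [g.1] ++ (g.2.map (fun v => PySem.List.slice v (some 1) none)).flatten)).map
      (fun x => [((PySem.List.pyGet? x 0).getD "", PySem.Str.join " " (PySem.List.slice x (some 1) none))])
    = pvRef l := by
  intro n
  induction n with
  | zero =>
    intro l hl
    have h0 : l = [] := List.length_eq_zero_iff.mp (Nat.le_zero.mp hl)
    subst h0; rw [pvRef]; simp only [List.map_nil]
    rw [show pyGroupByHead [] = [] from by rw [pyGroupByHead.eq_def]]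
    rfl
  | succ n ih =>
    intro l hl
    cases l with
    | nil =>
      rw [pvRef]; simp only [List.map_nil]
      rw [show pyGroupByHead [] = [] from by rw [pyGroupByHead.eq_def]]
      rfl
    | cons r rs =>
      rw [List.map_cons, pyGroupByHead]
      have hk : (PySem.List.pyGet? (pvToRow r) 0).getD "" = pvLabel r := by
        simp [pysem, pvToRow]
      have hpred : (fun v => ((PySem.List.pyGet? v 0).getD "") == ((PySem.List.pyGet? (pvToRow r) 0).getD "")) ∘ pvToRow
          = fun y => pvLabel y == pvLabel r := by
        funext y; simp [pysem, pvToRow]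
      rw [List.takeWhile_map, List.dropWhile_map, hpred]
      rw [List.map_cons, List.map_cons]
      rw [ih _ (by
        have := List.length_dropWhile_le (fun y => pvLabel y == pvLabel r) rs
        simp at hl; omega)]
      rw [pvRef]
      congr 1
      have hflat : ∀ run : List (List (String × String)),
          (run.map (fun y => [pvText y])).flatten = run.map pvText := by
        intro run; induction run with
        | nil => rfl
        | cons a t iht => simp [iht]
      have hone : ∀ (y : List (String × String)), PySem.List.slice (pvToRow y) (some 1) none = [pvText y] := by
        intro y; rw [PySem.List.slice_from_one]; rfl
      simp only [List.map_cons, List.flatten_cons, List.map_map, Function.comp_def, hone, hflat,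
        List.singleton_append, hk]
      rw [PySem.List.slice_from_one]
      have hget : ∀ (a : String) (l : List String), (PySem.List.pyGet? (a :: l) 0).getD "" = a := by
        intro a l; simp [pysem]
      rw [List.tail_cons, hget]

theorem a_eq_ref (rows : List (List (String × String))) : process_form rows = pvRef rows := by
  simp only [process_form]
  rw [List.zip_map']
  have hrow : (rows.map fun x => (pvLabel x, pvText x)).map (fun p => [p.1, p.2]) = rows.map pvToRow := by
    simp [pvToRow]
  rw [hrow]
  exact comb rows.length rows le_rfl

-- the flush at the end of B's loop, as a function of the loop state
def pvFlush (st : List (List (String × String)) × String × List String) : List (List (String × String)) :=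
  if st.2.2.isEmpty then st.1 else st.1 ++ [[(st.2.1, PySem.Str.join " " st.2.2)]]

-- B's loop invariant: with an open run (cur, acc), the flushed fold equals the emitted dicts so
-- far, then the dict for the current run extended by the matching prefix, then pvRef of the rest
theorem bfold (ps : List (List (String × String))) : ∀ res cur acc, acc ≠ [] →
    pvFlush (ps.foldl pvBStep (res, cur, acc))
    = res ++ ([(cur, PySem.Str.join " " (acc ++ (ps.takeWhile (fun y => pvLabel y == cur)).map pvText))]
        :: pvRef (ps.dropWhile (fun y => pvLabel y == cur))) := by
  induction ps with
  | nil => intro res cur acc h; simp [pvFlush, h, pvRef]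
  | cons p ps ih =>
    intro res cur acc h
    cases hl : (pvLabel p == cur) with
    | true =>
      have hb : (!acc.isEmpty && (pvLabel p == cur)) = true := by
        simp [hl, List.isEmpty_eq_false_iff.mpr h]
      simp only [List.foldl_cons, pvBStep, hb, if_pos]
      rw [ih res cur (acc ++ [pvText p]) (by simp)]
      simp [hl]
    | false =>
      have hb : (!acc.isEmpty && (pvLabel p == cur)) = false := by simp [hl]
      simp only [List.foldl_cons, pvBStep, hb]
      rw [if_neg (by simp), if_neg (by simp [List.isEmpty_eq_false_iff.mpr h])]
      rw [ih (res ++ [[(cur, PySem.Str.join " " acc)]]) (pvLabel p) [pvText p] (by simp)]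
      rw [List.takeWhile_cons, List.dropWhile_cons]
      simp only [hl, Bool.false_eq_true, if_false]
      rw [pvRef]
      simp

theorem b_eq_ref (rows : List (List (String × String))) : process_form_alt rows = pvRef rows := by
  cases rows with
  | nil => simp [process_form_alt, pvRef]
  | cons r rs =>
    show pvFlush ((r :: rs).foldl pvBStep ([], "", [])) = _
    simp only [List.foldl_cons, pvBStep]
    rw [if_neg (by simp)]
    simp only [List.isEmpty_nil, if_pos]
    rw [bfold rs [] (pvLabel r) [pvText r] (by simp)]
    rw [pvRef]
    simp

-- ===== VERDICT (by name: the statement is the Claim_ definition above) =====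
theorem process_form_spec : Claim_equal_process_form := by
  intro json_df _ _
  unfold Spec_process_form
  rw [a_eq_ref, b_eq_ref]
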